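-- pv_equiv track=rewrite | github.com/knitty-kim/ProgrammersSolvingCode | 프로그래머스/2/42584. 주식가격/주식가격.py | solution
-- ===== SOURCE A (Python) =====
-- def solution(prices):
--     stocks = [[i, 0] for i in prices]
--     for j in range(len(stocks)):
--         for i in range(j+1, len(prices)):
--             if stocks[j][0] <= prices[i]:
--                 stocks[j][1] += 1
--             else:
--                 stocks[j][1] += 1
--                 break
--     answer = [i[1] for i in stocks]
--     return answer
-- ===== SOURCE B (Python) =====
-- def solution(prices):
--     n = len(prices)
--     answer = [0] * n
--     stack = []
--     for i, p in enumerate(prices):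
--         while stack and prices[stack[-1]] > p:
--             j = stack.pop()
--             answer[j] = i - j
--         stack.append(i)
--     for j in stack:
--         answer[j] = n - 1 - j
--     return answer
-- ===== Notes on version B (the rewrite author's own statement) =====
-- stated objective: faster
-- what changed: Replaces the quadratic per-index forward scan with a single pass that keeps a monotonic stack of unresolved indices and resolves each duration when a lower price pops it.
import Mathlib
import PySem

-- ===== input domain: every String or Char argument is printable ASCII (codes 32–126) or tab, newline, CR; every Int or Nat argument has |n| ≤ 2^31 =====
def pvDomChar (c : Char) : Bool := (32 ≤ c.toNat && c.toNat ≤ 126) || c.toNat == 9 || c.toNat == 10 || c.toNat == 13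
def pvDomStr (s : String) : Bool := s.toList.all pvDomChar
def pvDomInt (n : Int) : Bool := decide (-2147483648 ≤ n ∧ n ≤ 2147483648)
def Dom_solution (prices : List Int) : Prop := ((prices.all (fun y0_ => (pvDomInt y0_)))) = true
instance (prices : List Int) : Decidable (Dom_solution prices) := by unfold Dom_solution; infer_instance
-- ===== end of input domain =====

-- B replaces A's quadratic per-index forward scan by a one-pass monotonic-stack algorithm (objective: faster).

-- ===== PORT A =====
-- A's inner loop 'for i in range(j+1, len(prices)): … break', accumulating into c (= stocks[j][1]).
-- Every index A reads is in range, so List.getD with a dummy default is exact here.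
def innerA (prices : List Int) (pj : Int) (i : Nat) (c : Int) : Int :=
  if i < prices.length then
    if pj ≤ prices.getD i 0 then innerA prices pj (i + 1) (c + 1)
    else c + 1
  else c
termination_by prices.length - i

def solution (prices : List Int) : List Int :=
  let stocks := prices.map (fun p => (p, (0 : Int)))
  let stocks := (List.range stocks.length).foldl
    (fun st j =>
      st.set j ((st.getD j (0, 0)).1, innerA prices (st.getD j (0, 0)).1 (j + 1) (st.getD j (0, 0)).2))
    stocks
  stocks.map (·.2)

-- ===== PORT B =====
-- B's 'while stack and prices[stack[-1]] > p' loop; the list head is Python's stack top.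
-- All stack entries and set positions are in-range indices, so getD/set are exact.
def popLoopB (prices : List Int) (i : Nat) (p : Int) : List Nat → List Int → List Nat × List Int
  | [], ans => ([], ans)
  | j :: rest, ans =>
    if prices.getD j 0 > p then popLoopB prices i p rest (ans.set j ((i : Int) - (j : Int)))
    else (j :: rest, ans)

def solution_alt (prices : List Int) : List Int :=
  let n := prices.length
  let res := (PySem.List.enumerate prices).foldl
    (fun s ip =>
      let r := popLoopB prices ip.1.toNat ip.2 s.1 s.2
      (ip.1.toNat :: r.1, r.2))
    (([], List.replicate n 0) : List Nat × List Int)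
  res.1.reverse.foldl (fun ans j => ans.set j ((n : Int) - 1 - (j : Int))) res.2

-- ===== PRECONDITION & SPEC =====
def Spec_solution (prices : List Int) (out : List Int) : Prop := out = solution_alt prices
instance (prices : List Int) (out : List Int) : Decidable (Spec_solution prices out) := by unfold Spec_solution; infer_instance

-- ===== CLAIM (what is proved, stated in full; the proofs are below) =====
def Claim_equal_solution : Prop := ∀ (prices : List Int), Dom_solution prices → Spec_solution prices (solution prices)

-- ===== LEMMAS AND PROOFS =====
-- Common specification both programs are reduced to: for index j, the answer is
-- (first k > j with prices[k] < prices[j]) - j, and n - 1 - j when no such k exists.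
def firstDrop (prices : List Int) (pj : Int) (i : Nat) : Option Nat :=
  if i < prices.length then
    if prices.getD i 0 < pj then some i else firstDrop prices pj (i + 1)
  else none
termination_by prices.length - i

def specAns (prices : List Int) (j : Nat) : Int :=
  match firstDrop prices (prices.getD j 0) (j + 1) with
  | some k => (k : Int) - (j : Int)
  | none => (prices.length : Int) - 1 - (j : Int)

lemma getD_set' {α : Type} (l : List α) (i j : Nat) (a : α) (d : α) :
    (l.set i a).getD j d = if i = j ∧ j < l.length then a else l.getD j d := by
  rcases eq_or_ne i j with rfl | h
  · by_cases hj : i < l.length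
    · simp [List.getD_eq_getElem?_getD, hj]
    · simp [List.getD_eq_getElem?_getD, hj]
  · simp [List.getD_eq_getElem?_getD, List.getElem?_set_ne h, h]

lemma firstDrop_eq_some (prices : List Int) (pj : Int) (s i : Nat)
    (h1 : s ≤ i) (h2 : i < prices.length) (h3 : prices.getD i 0 < pj)
    (h4 : ∀ k, s ≤ k → k < i → ¬ prices.getD k 0 < pj) :
    firstDrop prices pj s = some i := by
  obtain ⟨d, rfl⟩ : ∃ d, i = s + d := ⟨i - s, by omega⟩
  clear h1
  induction d generalizing s with
  | zero => rw [firstDrop]; simp only [Nat.add_zero] at h2 h3 ⊢; rw [if_pos h2, if_pos h3]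
  | succ d ih =>
    rw [firstDrop]
    rw [if_pos (by omega), if_neg (h4 s le_rfl (by omega))]
    have e : s + 1 + d = s + (d + 1) := by omega
    have := ih (s + 1) (by rw [e]; exact h2) (by rw [e]; exact h3) (fun k hk hk' => h4 k (by omega) (by omega))
    rw [this, e]

lemma firstDrop_eq_none (prices : List Int) (pj : Int) (s : Nat)
    (h : ∀ k, s ≤ k → k < prices.length → ¬ prices.getD k 0 < pj) :
    firstDrop prices pj s = none := by
  rw [firstDrop]
  split
  · rw [if_neg (h s le_rfl (by assumption))]
    exact firstDrop_eq_none prices pj (s+1) (fun k hk hk' => h k (by omega) hk')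
  · rfl
termination_by prices.length - s

lemma firstDrop_ge (prices : List Int) (pj : Int) (s k : Nat)
    (h : firstDrop prices pj s = some k) : s ≤ k ∧ k < prices.length := by
  rw [firstDrop] at h
  split at h
  · split at h
    · cases h; omega
    · have := firstDrop_ge prices pj (s+1) k h; omega
  · cases h
termination_by prices.length - s

-- A's inner counting loop counts every index up to and including the first drop.
lemma innerA_eq (prices : List Int) (pj : Int) (i : Nat) (c : Int) (hi : i ≤ prices.length) :
    innerA prices pj i c =
      c + (match firstDrop prices pj i with
           | some k => (k : Int) - (i : Int) + 1
           | none => (prices.length : Int) - (i : Int)) := by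
  rw [innerA, firstDrop]
  split
  · rename_i hlt
    by_cases hd : prices.getD i 0 < pj
    · rw [if_neg (by omega), if_pos hd]; push_cast; ring
    · rw [if_pos (by omega), if_neg hd]
      rw [innerA_eq prices pj (i+1) (c+1) (by omega)]
      cases hfd : firstDrop prices pj (i+1) with
      | some k =>
        have := firstDrop_ge prices pj (i+1) k hfd
        simp only []
        push_cast; ring
      | none => simp only []; push_cast; ring
  · rename_i hge
    have : i = prices.length := by omega
    subst this
    simp
termination_by prices.length - i

-- A's outer loop: after m steps, entries below m hold their final count, the rest still hold 0.
lemma outerA_key (prices : List Int) (m : Nat) (hm : m ≤ prices.length) :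
    ((List.range m).foldl
      (fun st j =>
        st.set j ((st.getD j (0, 0)).1, innerA prices (st.getD j (0, 0)).1 (j + 1) (st.getD j (0, 0)).2))
      (prices.map (fun p => (p, (0 : Int))))).length = prices.length ∧
    ∀ j, j < prices.length →
      ((List.range m).foldl
        (fun st j =>
          st.set j ((st.getD j (0, 0)).1, innerA prices (st.getD j (0, 0)).1 (j + 1) (st.getD j (0, 0)).2))
        (prices.map (fun p => (p, (0 : Int))))).getD j (0, 0) =
        (prices.getD j 0, if j < m then innerA prices (prices.getD j 0) (j + 1) 0 else 0) := by
  induction m with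
  | zero =>
    refine ⟨by simp, fun j hj => ?_⟩
    simp [List.getD_eq_getElem?_getD, List.getElem?_map, List.getElem?_eq_getElem hj]
  | succ m ih =>
    have ih := ih (by omega)
    rw [List.range_succ, List.foldl_append]
    obtain ⟨hlen, hget⟩ := ih
    have hm' : m < prices.length := by omega
    refine ⟨by simpa using hlen, fun j hj => ?_⟩
    simp only [List.foldl_cons, List.foldl_nil]
    rw [hget m hm']
    simp only [if_neg (lt_irrefl m)]
    rw [getD_set', hlen]
    rcases eq_or_ne m j with rfl | hne
    · simp [hm']
    · rw [if_neg (by tauto), hget j hj]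
      by_cases hjm : j < m
      · rw [if_pos hjm, if_pos (by omega)]
      · rw [if_neg hjm, if_neg (by omega)]

lemma solution_eq_spec (prices : List Int) :
    solution prices = (List.range prices.length).map (specAns prices) := by
  obtain ⟨hlen, hget⟩ := outerA_key prices prices.length le_rfl
  unfold solution
  simp only [List.length_map]
  apply List.ext_getElem
  · simpa using hlen
  · intro j h1 h2
    simp only [List.getElem_map, List.getElem_range]
    have hj : j < prices.length := by simpa using h2
    have : ((List.range prices.length).foldl
        (fun st j =>
          st.set j ((st.getD j (0, 0)).1, innerA prices (st.getD j (0, 0)).1 (j + 1) (st.getD j (0, 0)).2))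
        (prices.map (fun p => (p, (0 : Int)))))[j] =
        (prices.getD j 0, innerA prices (prices.getD j 0) (j + 1) 0) := by
      rw [← List.getD_eq_getElem _ (0,0), hget j hj, if_pos hj]
    rw [this]
    rw [innerA_eq prices (prices.getD j 0) (j + 1) 0 (by omega)]
    unfold specAns
    cases hfd : firstDrop prices (prices.getD j 0) (j + 1) with
    | some k => simp only []; push_cast; ring
    | none => simp only []; push_cast; ring

-- Loop invariant of B's single pass after the first i elements: the stack holds exactly the
-- indices whose duration is unresolved (no later lower price yet), and answer is final elsewhere.
def InvB (prices : List Int) (i : Nat) (st : List Nat) (ans : List Int) : Prop :=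
  ans.length = prices.length ∧
  st.Pairwise (· > ·) ∧
  (∀ j ∈ st, j < i ∧ ∀ k, j < k → k < i → prices.getD j 0 ≤ prices.getD k 0) ∧
  (∀ j, j < i → j ∉ st → ans.getD j 0 = specAns prices j)

lemma popLoopB_spec (prices : List Int) (i : Nat) (hi : i < prices.length) (st : List Nat) :
    ∀ ans : List Int, InvB prices i st ans →
      (popLoopB prices i (prices.getD i 0) st ans).1.Sublist st ∧
      (∀ j ∈ (popLoopB prices i (prices.getD i 0) st ans).1,
        ¬ prices.getD j 0 > prices.getD i 0) ∧
      InvB prices i (popLoopB prices i (prices.getD i 0) st ans).1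
        (popLoopB prices i (prices.getD i 0) st ans).2 := by
  induction st with
  | nil =>
    intro ans hInv
    exact ⟨List.Sublist.refl _, by simp [popLoopB], hInv⟩
  | cons j rest ih =>
    intro ans hInv
    obtain ⟨hlen, hpw, hmem, hans⟩ := hInv
    by_cases hpop : prices.getD j 0 > prices.getD i 0
    · rw [popLoopB, if_pos hpop]
      have hji := hmem j (List.mem_cons_self)
      have hInv' : InvB prices i rest (ans.set j ((i : Int) - (j : Int))) := by
        refine ⟨by simp [hlen], (List.pairwise_cons.mp hpw).2,
          fun j' hj' => hmem j' (List.mem_cons_of_mem _ hj'), fun j' hj' hnot => ?_⟩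
        rw [getD_set']
        rcases eq_or_ne j j' with rfl | hne
        · rw [if_pos ⟨rfl, by omega⟩]
          have hfd : firstDrop prices (prices.getD j 0) (j + 1) = some i := by
            refine firstDrop_eq_some prices _ (j + 1) i (by omega) hi (by omega) ?_
            intro k hk hk'
            have := hji.2 k (by omega) hk'
            omega
          unfold specAns
          rw [hfd]
        · rw [if_neg (by tauto)]
          exact hans j' hj' (by simp [hnot, Ne.symm hne])
      have := ih _ hInv'
      exact ⟨this.1.trans (List.sublist_cons_self j rest), this.2.1, this.2.2⟩
    · rw [popLoopB, if_neg hpop]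
      refine ⟨List.Sublist.refl _, fun j' hj' => ?_, hlen, hpw, hmem, hans⟩
      rcases List.mem_cons.mp hj' with rfl | hj'
      · exact hpop
      · have h1 := hmem j' (List.mem_cons_of_mem _ hj')
        have h2 : j' < j := (List.pairwise_cons.mp hpw).1 j' hj'
        have h3 := hmem j List.mem_cons_self
        have h4 := h1.2 j h2 h3.1
        omega

lemma step_spec (prices : List Int) (i : Nat) (hi : i < prices.length)
    (st : List Nat) (ans : List Int) (hInv : InvB prices i st ans) :
    InvB prices (i + 1) (i :: (popLoopB prices i (prices.getD i 0) st ans).1)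
      (popLoopB prices i (prices.getD i 0) st ans).2 := by
  obtain ⟨hsub, hle, hlen, hpw, hmem, hans⟩ := popLoopB_spec prices i hi st ans hInv
  refine ⟨hlen, ?_, ?_, ?_⟩
  · rw [List.pairwise_cons]
    exact ⟨fun j hj => (hmem j hj).1, hpw⟩
  · intro j hj
    rcases List.mem_cons.mp hj with rfl | hj
    · exact ⟨by omega, fun k hk hk' => by omega⟩
    · refine ⟨by have := (hmem j hj).1; omega, fun k hk hk' => ?_⟩
      rcases Nat.lt_succ_iff_lt_or_eq.mp hk' with hk' | rfl
      · exact (hmem j hj).2 k hk hk'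
      · have := hle j hj; omega
  · intro j hj hnot
    exact hans j (by rcases List.mem_cons.not.mp hnot with h; omega)
      (fun h => hnot (List.mem_cons_of_mem _ h))

lemma foldl_set_getD (f : Nat → Int) : ∀ (l : List Nat) (ans : List Int),
    (l.foldl (fun a j => a.set j (f j)) ans).length = ans.length ∧
    ∀ j, (l.foldl (fun a j => a.set j (f j)) ans).getD j 0 =
      if j ∈ l ∧ j < ans.length then f j else ans.getD j 0
  | [], ans => ⟨rfl, by simp⟩
  | a :: l, ans => by
    rw [List.foldl_cons]
    obtain ⟨ihl, ihg⟩ := foldl_set_getD f l (ans.set a (f a))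
    refine ⟨by simp [ihl], fun j => ?_⟩
    rw [ihg j, getD_set']
    simp only [List.length_set, List.mem_cons]
    by_cases h1 : j ∈ l <;> by_cases h2 : j < ans.length <;> by_cases h3 : a = j <;>
      simp [h1, h2, h3]; (intro h; exact absurd h.symm h3)

lemma mainfold_key (prices : List Int) (m : Nat) (hm : m ≤ prices.length) :
    InvB prices m
      ((List.range m).foldl
        (fun s k => ((k : Nat) :: (popLoopB prices k (prices.getD k 0) s.1 s.2).1,
          (popLoopB prices k (prices.getD k 0) s.1 s.2).2))
        (([], List.replicate prices.length 0) : List Nat × List Int)).1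
      ((List.range m).foldl
        (fun s k => ((k : Nat) :: (popLoopB prices k (prices.getD k 0) s.1 s.2).1,
          (popLoopB prices k (prices.getD k 0) s.1 s.2).2))
        (([], List.replicate prices.length 0) : List Nat × List Int)).2 := by
  induction m with
  | zero =>
    exact ⟨by simp, by simp, by simp, fun j hj => by omega⟩
  | succ m ih =>
    rw [List.range_succ, List.foldl_append, List.foldl_cons, List.foldl_nil]
    exact step_spec prices m (by omega) _ _ (ih (by omega))

lemma solution_alt_eq_spec (prices : List Int) :
    solution_alt prices = (List.range prices.length).map (specAns prices) := by
  unfold solution_alt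
  rw [PySem.List.enumerate_eq_map_pyRange prices 0]
  simp only [PySem.List.len_eq, PySem.List.pyRange_zero_natCast, List.foldl_map,
    PySem.List.pyGetD_natCast, Int.toNat_natCast]
  obtain ⟨hlen, hpw, hmem, hans⟩ := mainfold_key prices prices.length le_rfl
  obtain ⟨flen, fget⟩ := foldl_set_getD
    (fun j => (prices.length : Int) - 1 - (j : Int))
    (((List.range prices.length).foldl
        (fun s k => ((k : Nat) :: (popLoopB prices k (prices.getD k 0) s.1 s.2).1,
          (popLoopB prices k (prices.getD k 0) s.1 s.2).2))
        (([], List.replicate prices.length 0) : List Nat × List Int)).1.reverse)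
    (((List.range prices.length).foldl
        (fun s k => ((k : Nat) :: (popLoopB prices k (prices.getD k 0) s.1 s.2).1,
          (popLoopB prices k (prices.getD k 0) s.1 s.2).2))
        (([], List.replicate prices.length 0) : List Nat × List Int)).2)
  apply List.ext_getElem
  · simp only [flen, hlen, List.length_map, List.length_range]
  · intro j h1 h2
    have hj : j < prices.length := by simpa using h2
    simp only [List.getElem_map, List.getElem_range]
    rw [← List.getD_eq_getElem _ 0, fget j]
    rw [hlen]
    by_cases hmemst : j ∈ (((List.range prices.length).foldl
        (fun s k => ((k : Nat) :: (popLoopB prices k (prices.getD k 0) s.1 s.2).1,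
          (popLoopB prices k (prices.getD k 0) s.1 s.2).2))
        (([], List.replicate prices.length 0) : List Nat × List Int)).1)
    · rw [if_pos ⟨List.mem_reverse.mpr hmemst, hj⟩]
      have hfd : firstDrop prices (prices.getD j 0) (j + 1) = none := by
        refine firstDrop_eq_none prices _ (j + 1) ?_
        intro k hk hk'
        have := (hmem j hmemst).2 k (by omega) hk'
        omega
      unfold specAns
      rw [hfd]
    · rw [if_neg (fun hc => hmemst (List.mem_reverse.mp hc.1))]
      exact hans j hj hmemst

-- ===== VERDICT (by name: the statement is the Claim_ definition above) =====
theorem solution_spec : Claim_equal_solution := by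
  intro prices _
  unfold Spec_solution
  rw [solution_eq_spec, solution_alt_eq_spec]
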